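-- pv_equiv track=rewrite | github.com/jordenrsantos-sys/MTG-Deck | api/engine/layers/disruption_surface_v1.py | _build_slot_hits
-- ===== SOURCE A (Python) =====
-- from typing import Any, Dict, List, Tuple
--
-- def _nonempty_str(value: Any) -> str | None:
--     if isinstance(value, str):
--         token = value.strip()
--         if token != "":
--             return token
--     return None
--
-- def _clean_sorted_unique_strings(values: Any) -> List[str]:
--     if not isinstance(values, list):
--         return []
--
--     cleaned = {
--         token
--         for token in (_nonempty_str(value) for value in values)
--         if token is not None
--     }
--     return sorted(cleaned)
--
-- def _build_slot_hits(
--     primitive_index_by_slot: Dict[str, Any],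
--     playable_slots: List[str],
--     disruption_primitive_set: set[str],
-- ) -> Tuple[Dict[str, List[str]], Dict[str, int]]:
--     slot_disruption_hits: Dict[str, List[str]] = {}
--     primitive_counts: Dict[str, int] = {}
--
--     for slot_id in playable_slots:
--         primitives = _clean_sorted_unique_strings(primitive_index_by_slot.get(slot_id))
--         disruption_hits = [primitive for primitive in primitives if primitive in disruption_primitive_set]
--         if not disruption_hits:
--             continue
--
--         slot_disruption_hits[slot_id] = disruption_hits
--         for primitive_id in disruption_hits:
--             primitive_counts[primitive_id] = primitive_counts.get(primitive_id, 0) + 1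
--
--     return slot_disruption_hits, primitive_counts
-- ===== SOURCE B (Python) =====
-- from typing import Any, Dict, List, Tuple
--
-- def _slot_hits(values: Any, disruption_primitive_set) -> List[str]:
--     # sort the stripped tokens WITH duplicates, then one scan that skips
--     # adjacent duplicates and keeps only non-empty disruption primitives
--     if not isinstance(values, list):
--         return []
--     tokens = sorted(v.strip() for v in values if isinstance(v, str))
--     hits: List[str] = []
--     prev = None
--     for tok in tokens:
--         if tok != "" and tok != prev and tok in disruption_primitive_set:
--             hits.append(tok)
--         prev = tok
--     return hits
--
-- def _build_slot_hits(
--     primitive_index_by_slot: Dict[str, Any],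
--     playable_slots: List[str],
--     disruption_primitive_set: set,
-- ) -> Tuple[Dict[str, List[str]], Dict[str, int]]:
--     # stage 1: one flat pass producing (slot, hits) pairs
--     per_slot = [
--         (slot_id, hits)
--         for slot_id in playable_slots
--         for hits in [_slot_hits(primitive_index_by_slot.get(slot_id), disruption_primitive_set)]
--         if hits
--     ]
--     # stage 2: both result dicts are derived from that pair list
--     slot_disruption_hits = dict(per_slot)
--     primitive_counts: Dict[str, int] = {}
--     for _, hits in per_slot:
--         for primitive_id in hits:
--             primitive_counts[primitive_id] = primitive_counts.get(primitive_id, 0) + 1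
--     return slot_disruption_hits, primitive_counts
-- ===== Notes on version B (the rewrite author's own statement) =====
-- stated objective: alternative
-- what changed: Per slot B sorts the stripped tokens with duplicates and does a single adjacent-dedup scan that simultaneously drops empties and non-disruption tokens (instead of A's build-a-set, sort, then filter), and B first materialises a flat (slot, hits) pair list from which both result dicts are derived in separate later stages (dict() over the pairs; a tally loop over the pairs) instead of A building both dicts incrementally inside the slot loop.
import Mathlib
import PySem

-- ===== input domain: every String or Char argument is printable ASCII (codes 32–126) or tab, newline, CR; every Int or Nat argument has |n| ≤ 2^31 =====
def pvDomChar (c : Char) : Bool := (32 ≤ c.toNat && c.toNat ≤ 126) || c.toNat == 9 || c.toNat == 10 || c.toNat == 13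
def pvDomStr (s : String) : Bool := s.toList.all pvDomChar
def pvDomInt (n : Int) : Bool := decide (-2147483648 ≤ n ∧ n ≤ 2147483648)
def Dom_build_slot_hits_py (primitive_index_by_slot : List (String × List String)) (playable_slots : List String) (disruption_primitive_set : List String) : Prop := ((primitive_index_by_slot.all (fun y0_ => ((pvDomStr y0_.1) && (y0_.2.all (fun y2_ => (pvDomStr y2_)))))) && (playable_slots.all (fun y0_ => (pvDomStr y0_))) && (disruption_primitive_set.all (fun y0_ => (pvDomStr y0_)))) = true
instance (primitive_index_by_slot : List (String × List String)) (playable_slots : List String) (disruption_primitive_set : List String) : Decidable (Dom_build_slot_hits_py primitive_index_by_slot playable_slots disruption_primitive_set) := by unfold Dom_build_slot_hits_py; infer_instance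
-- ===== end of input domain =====

-- B re-decomposes the computation: per slot it sorts the stripped tokens WITH duplicates and makes one
-- adjacent-dedup scan that also drops empties and non-disruption tokens (A builds a set, sorts it, then
-- filters), and it first materialises a flat (slot, hits) pair list from which BOTH result dicts are
-- derived afterwards (A builds both dicts incrementally inside the slot loop). Same values, simpler staging.

-- ===== PORT A =====
-- _nonempty_str(value): value is always a str on this domain, so the isinstance branch is taken
def pvNonemptyStr (value : String) : Option String :=
  let token := PySem.Str.strip value
  if token ≠ "" then some token else none

-- _clean_sorted_unique_strings(values): values is dict.get's result, None (not a list → []) or a list of str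
def pvCleanSortedUnique (values : Option (List String)) : List String :=
  match values with
  | none => []
  | some vs =>
    PySem.List.sorted (PySem.Set.ofList (vs.filterMap pvNonemptyStr)) (fun x => x)

def build_slot_hits_py (primitive_index_by_slot : List (String × List String)) (playable_slots : List String) (disruption_primitive_set : List String) : (List (String × List String)) × (List (String × Int)) :=
  let st :=
    playable_slots.foldl
      (fun (st : PySem.Dict String (List String) × PySem.Dict String Int) slot_id =>
        let primitives := pvCleanSortedUnique ((PySem.Dict.mk primitive_index_by_slot).get? slot_id)
        let disruption_hits := primitives.filter (fun p => PySem.Set.contains disruption_primitive_set p)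
        if disruption_hits = [] then st
        else
          (st.1.insert slot_id disruption_hits,
           disruption_hits.foldl (fun c pid => c.insert pid (c.getD pid 0 + 1)) st.2))
      (PySem.Dict.empty, PySem.Dict.empty)
  (st.1.items, st.2.items)

-- ===== PORT B =====
-- _slot_hits(values, disruption_primitive_set): every value is a str on this domain;
-- 'prev' is Python's None-or-str loop variable, hence Option String
def pvSlotHitsB (values : Option (List String)) (disruption_primitive_set : List String) : List String :=
  match values with
  | none => []
  | some vs =>
    let tokens := PySem.List.sorted (vs.map PySem.Str.strip) (fun x => x)
    (tokens.foldl
      (fun (st : List String × Option String) tok =>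
        (if tok ≠ "" ∧ some tok ≠ st.2 ∧ PySem.Set.contains disruption_primitive_set tok
         then st.1 ++ [tok] else st.1,
         some tok))
      ([], none)).1

def build_slot_hits_py_alt (primitive_index_by_slot : List (String × List String)) (playable_slots : List String) (disruption_primitive_set : List String) : (List (String × List String)) × (List (String × Int)) :=
  let per_slot :=
    playable_slots.filterMap
      (fun slot_id =>
        let hits := pvSlotHitsB ((PySem.Dict.mk primitive_index_by_slot).get? slot_id) disruption_primitive_set
        if hits = [] then none else some (slot_id, hits))
  let slot_disruption_hits := PySem.Dict.ofList per_slot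
  let primitive_counts :=
    per_slot.foldl
      (fun (c : PySem.Dict String Int) p =>
        p.2.foldl (fun c pid => c.insert pid (c.getD pid 0 + 1)) c)
      PySem.Dict.empty
  (slot_disruption_hits.items, primitive_counts.items)

-- ===== PRECONDITION & SPEC =====
def Spec_build_slot_hits_py (primitive_index_by_slot : List (String × List String)) (playable_slots : List String) (disruption_primitive_set : List String) (out : (List (String × List String)) × (List (String × Int))) : Prop := out = build_slot_hits_py_alt primitive_index_by_slot playable_slots disruption_primitive_set
instance (primitive_index_by_slot : List (String × List String)) (playable_slots : List String) (disruption_primitive_set : List String) (out : (List (String × List String)) × (List (String × Int))) : Decidable (Spec_build_slot_hits_py primitive_index_by_slot playable_slots disruption_primitive_set out) := by unfold Spec_build_slot_hits_py; infer_instance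

-- ===== CLAIM (what is proved, stated in full; the proofs are below) =====
def Claim_equal_build_slot_hits_py : Prop := ∀ (primitive_index_by_slot : List (String × List String)) (playable_slots : List String) (disruption_primitive_set : List String), Dom_build_slot_hits_py primitive_index_by_slot playable_slots disruption_primitive_set → Spec_build_slot_hits_py primitive_index_by_slot playable_slots disruption_primitive_set (build_slot_hits_py primitive_index_by_slot playable_slots disruption_primitive_set)

-- ===== LEMMAS AND PROOFS =====

-- recursive view of B's scan loop (proof-side only)
def pvScan (dset : List String) (prev : Option String) (l : List String) : List String :=
  match l with
  | [] => []
  | t :: r =>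
    (if t ≠ "" ∧ some t ≠ prev ∧ PySem.Set.contains dset t then [t] else []) ++
      pvScan dset (some t) r

theorem pvScan_foldl (dset : List String) (l : List String) (h : List String) (prev : Option String) :
    (l.foldl
      (fun (st : List String × Option String) tok =>
        (if tok ≠ "" ∧ some tok ≠ st.2 ∧ PySem.Set.contains dset tok
         then st.1 ++ [tok] else st.1,
         some tok))
      (h, prev)).1 = h ++ pvScan dset prev l := by
  induction l generalizing h prev with
  | nil => simp [pvScan]
  | cons t r ih =>
    rw [List.foldl_cons]
    show (List.foldl _
      ((if t ≠ "" ∧ some t ≠ prev ∧ PySem.Set.contains dset t then h ++ [t] else h), some t) r).1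
      = h ++ pvScan dset prev (t :: r)
    rw [pvScan]
    by_cases c : t ≠ "" ∧ some t ≠ prev ∧ PySem.Set.contains dset t
    · rw [if_pos c, if_pos c, ih, List.append_assoc, List.singleton_append]
    · rw [if_neg c, if_neg c, ih, List.nil_append]

theorem pvScan_mem (dset : List String) (l : List String) (prev : Option String)
    (hs : l.Pairwise (· ≤ ·)) (hb : ∀ p, prev = some p → ∀ x ∈ l, p ≤ x) (a : String) :
    a ∈ pvScan dset prev l ↔
      a ∈ l ∧ a ≠ "" ∧ (∀ p, prev = some p → a ≠ p) ∧ PySem.Set.contains dset a := by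
  induction l generalizing prev with
  | nil => simp [pvScan]
  | cons t r ih =>
    have htr : ∀ x ∈ r, t ≤ x := fun x hx => (List.pairwise_cons.mp hs).1 x hx
    rw [pvScan, List.mem_append]
    rw [ih (some t) (List.pairwise_cons.mp hs).2
      (fun p hp x hx => by cases hp; exact htr x hx)]
    constructor
    · intro hm
      rcases hm with hm1 | hm2
      · by_cases c : t ≠ "" ∧ some t ≠ prev ∧ PySem.Set.contains dset t
        · rw [if_pos c] at hm1
          rcases List.mem_singleton.mp hm1 with rfl
          exact ⟨List.mem_cons_self, c.1,
            fun p hp => by subst hp; exact fun he => c.2.1 (by rw [he]), c.2.2⟩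
        · rw [if_neg c] at hm1
          exact absurd hm1 (List.not_mem_nil)
      · obtain ⟨har, hne, hat, hc⟩ := hm2
        have hat' : a ≠ t := hat t rfl
        refine ⟨List.mem_cons_of_mem _ har, hne, ?_, hc⟩
        intro p hp hap
        subst hp; subst hap
        have h1 : a ≤ t := hb a rfl t List.mem_cons_self
        have h2 : t ≤ a := htr a har
        exact hat' (le_antisymm h1 h2)
    · rintro ⟨hal, hne, hprev, hc⟩
      by_cases hat : a = t
      · subst hat
        have c : a ≠ "" ∧ some a ≠ prev ∧ PySem.Set.contains dset a := by
          refine ⟨hne, ?_, hc⟩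
          intro he
          cases prev with
          | none => simp at he
          | some p => exact hprev p rfl (Option.some.inj he)
        exact Or.inl (by rw [if_pos c]; exact List.mem_singleton.mpr rfl)
      · have har : a ∈ r := by
          rcases List.mem_cons.mp hal with h | h
          · exact absurd h hat
          · exact h
        exact Or.inr ⟨har, hne, fun p hp => by cases hp; exact hat, hc⟩

theorem pvScan_pairwise (dset : List String) (l : List String) (prev : Option String)
    (hs : l.Pairwise (· ≤ ·)) (hb : ∀ p, prev = some p → ∀ x ∈ l, p ≤ x) :
    (pvScan dset prev l).Pairwise (· < ·) := by
  induction l generalizing prev with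
  | nil => exact List.Pairwise.nil
  | cons t r ih =>
    have htr : ∀ x ∈ r, t ≤ x := fun x hx => (List.pairwise_cons.mp hs).1 x hx
    have hbt : ∀ p, (some t : Option String) = some p → ∀ x ∈ r, p ≤ x :=
      fun p hp x hx => by cases hp; exact htr x hx
    have tail := ih (some t) (List.pairwise_cons.mp hs).2 hbt
    rw [pvScan]
    by_cases c : t ≠ "" ∧ some t ≠ prev ∧ PySem.Set.contains dset t
    · rw [if_pos c, List.singleton_append]
      refine List.pairwise_cons.mpr ⟨?_, tail⟩
      intro b hbmem
      have := (pvScan_mem dset r (some t) (List.pairwise_cons.mp hs).2 hbt b).mp hbmem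
      obtain ⟨hbr, _, hbt', _⟩ := this
      exact lt_of_le_of_ne (htr b hbr) (Ne.symm (hbt' t rfl))
    · rw [if_neg c, List.nil_append]; exact tail

-- per-slot equality: A's sorted-set-then-filter equals B's sort-then-scan
theorem pvSlotHits_eq (values : Option (List String)) (dset : List String) :
    (pvCleanSortedUnique values).filter (fun p => PySem.Set.contains dset p)
      = pvSlotHitsB values dset := by
  cases values with
  | none => rfl
  | some vs =>
    simp only [pvCleanSortedUnique, pvSlotHitsB]
    rw [pvScan_foldl dset _ [] none, List.nil_append]
    set L := (PySem.List.sorted (PySem.Set.ofList (vs.filterMap pvNonemptyStr)) (fun x => x)).filter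
        (fun p => PySem.Set.contains dset p) with hL
    set T := PySem.List.sorted (vs.map PySem.Str.strip) (fun x => x) with hT
    have hTsorted : T.Pairwise (· ≤ ·) := PySem.List.sorted_pairwise _ _
    have hbnone : ∀ p, (none : Option String) = some p → ∀ x ∈ T, p ≤ x := by
      intro p hp; cases hp
    have hLpw : L.Pairwise (· < ·) :=
      (PySem.List.sorted_ofList_pairwise_lt _).filter _
    have hSpw : (pvScan dset none T).Pairwise (· < ·) :=
      pvScan_pairwise dset T none hTsorted hbnone
    have hmem : ∀ a, a ∈ pvScan dset none T ↔ a ∈ L := by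
      intro a
      rw [pvScan_mem dset T none hTsorted hbnone a]
      simp only [hL, List.mem_filter, PySem.List.mem_sorted, PySem.Set.mem_ofList,
        List.mem_filterMap, List.mem_map, hT]
      constructor
      · rintro ⟨⟨v, hv, hva⟩, hne, _, hc⟩
        exact ⟨⟨v, hv, by simp [pvNonemptyStr, hva, hne]⟩, hc⟩
      · rintro ⟨⟨v, hv, hva⟩, hc⟩
        simp only [pvNonemptyStr] at hva
        by_cases h : PySem.Str.strip v ≠ ""
        · rw [if_pos h] at hva
          cases hva
          exact ⟨⟨v, hv, rfl⟩, h, fun p hp => by simp at hp, hc⟩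
        · simp [h] at hva
    have hperm : (pvScan dset none T).Perm L :=
      (List.perm_ext_iff_of_nodup (hSpw.imp ne_of_lt) (hLpw.imp ne_of_lt)).mpr hmem
    calc L = PySem.List.sorted L (fun x => x) :=
            (PySem.List.sorted_eq_of_perm_of_pairwise_lt L L _ (List.Perm.refl L) hLpw).symm
      _ = pvScan dset none T :=
            PySem.List.sorted_eq_of_perm_of_pairwise_lt L _ _ hperm hSpw

-- A's paired fold splits into its two components
theorem pvFst_fold (slots : List String) (f : String → List String)
    (H : PySem.Dict String (List String)) (C : PySem.Dict String Int) :
    (slots.foldl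
      (fun (st : PySem.Dict String (List String) × PySem.Dict String Int) s =>
        if f s = [] then st
        else (st.1.insert s (f s), (f s).foldl (fun c pid => c.insert pid (c.getD pid 0 + 1)) st.2))
      (H, C)).1
    = slots.foldl (fun h s => if f s = [] then h else h.insert s (f s)) H := by
  induction slots generalizing H C with
  | nil => rfl
  | cons t rest ih =>
    simp only [List.foldl_cons]
    by_cases h : f t = [] <;> simp only [h, if_true, if_false, ih]

theorem pvSnd_fold (slots : List String) (f : String → List String)
    (H : PySem.Dict String (List String)) (C : PySem.Dict String Int) :
    (slots.foldl
      (fun (st : PySem.Dict String (List String) × PySem.Dict String Int) s =>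
        if f s = [] then st
        else (st.1.insert s (f s), (f s).foldl (fun c pid => c.insert pid (c.getD pid 0 + 1)) st.2))
      (H, C)).2
    = slots.foldl
        (fun c s => if f s = [] then c else (f s).foldl (fun c pid => c.insert pid (c.getD pid 0 + 1)) c)
        C := by
  induction slots generalizing H C with
  | nil => rfl
  | cons t rest ih =>
    simp only [List.foldl_cons]
    by_cases h : f t = [] <;> simp only [h, if_true, if_false, ih]

-- ===== VERDICT (by name: the statement is the Claim_ definition above) =====
theorem build_slot_hits_py_spec : Claim_equal_build_slot_hits_py := by
  intro pibs slots dset _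
  show _ = _
  simp only [build_slot_hits_py, build_slot_hits_py_alt, pvSlotHits_eq]
  refine Prod.ext ?_ ?_
  · simp only [pvFst_fold, PySem.Dict.ofList, PySem.Dict.update, List.foldl_filterMap]
    congr 1
    apply PySem.List.foldl_congr_mem
    intro acc s _
    by_cases h : pvSlotHitsB ((PySem.Dict.mk pibs).get? s) dset = [] <;> simp [h]
  · simp only [pvSnd_fold, List.foldl_filterMap]
    congr 1
    apply PySem.List.foldl_congr_mem
    intro acc s _
    by_cases h : pvSlotHitsB ((PySem.Dict.mk pibs).get? s) dset = [] <;> simp [h]
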